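-- pv_equiv track=rewrite | github.com/defender-777/Build-Own-Shell | app/main.py | parse_redirection
-- ===== SOURCE A (Python) =====
-- def parse_redirection(args):
--     stdout_file = None
--     stdout_mode = None
--     stderr_file = None
--     stderr_mode = None
--     new_args = []
--     i = 0
--
--     while i < len(args):
--         if args[i] == ">" or args[i] == "1>":
--             if i + 1 < len(args):
--                 stdout_file = args[i + 1]
--                 stdout_mode = "w"
--                 i += 2
--                 continue
--         elif args[i] == ">>" or args[i] == "1>>":
--             if i + 1 < len(args):
--                 stdout_file = args[i + 1]
--                 stdout_mode = "a"
--                 i += 2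
--                 continue
--         elif args[i] == "2>":
--             if i + 1 < len(args):
--                 stderr_file = args[i + 1]
--                 stderr_mode = "w"
--                 i += 2
--                 continue
--         elif args[i] == "2>>":
--             if i + 1 < len(args):
--                 stderr_file = args[i + 1]
--                 stderr_mode = "a"
--                 i += 2
--                 continue
--         else:
--             new_args.append(args[i])
--
--         i += 1
--
--     return new_args, stdout_file, stdout_mode, stderr_file, stderr_mode
-- ===== SOURCE B (Python) =====
-- OPS = {">": (0, "w"), "1>": (0, "w"), ">>": (0, "a"), "1>>": (0, "a"),
--       "2>": (1, "w"), "2>>": (1, "a")}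
--
--
-- def parse_redirection(args):
--     # Phase 1: table-driven scan splitting args into plain arguments and a list
--     # of redirection events (target stream, filename, mode).
--     new_args, events = [], []
--     i, n = 0, len(args)
--     while i < n:
--         op = OPS.get(args[i])
--         if op is None:
--             new_args.append(args[i])
--             i += 1
--         elif i + 1 < n:
--             events.append((op[0], args[i + 1], op[1]))
--             i += 2
--         else:
--             i += 1  # trailing operator with no filename: dropped
--     # Phase 2: reduce the events, later events overwriting earlier ones
--     state = (None, None, None, None)
--     for tgt, f, m in events:
--         if tgt == 0:
--             state = (f, m, state[2], state[3])
--         else: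
--             state = (state[0], state[1], f, m)
--     return (new_args,) + state
-- ===== Notes on version B (the rewrite author's own statement) =====
-- stated objective: alternative
-- what changed: Replaces A's single imperative loop with four mutable file/mode slots and an if/elif operator chain by a two-phase pipeline: a table-driven (OPS dict) scan that splits args into plain arguments plus a list of redirection events (target, filename, mode), followed by a separate fold of the events where later events overwrite earlier ones.
import Mathlib
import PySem

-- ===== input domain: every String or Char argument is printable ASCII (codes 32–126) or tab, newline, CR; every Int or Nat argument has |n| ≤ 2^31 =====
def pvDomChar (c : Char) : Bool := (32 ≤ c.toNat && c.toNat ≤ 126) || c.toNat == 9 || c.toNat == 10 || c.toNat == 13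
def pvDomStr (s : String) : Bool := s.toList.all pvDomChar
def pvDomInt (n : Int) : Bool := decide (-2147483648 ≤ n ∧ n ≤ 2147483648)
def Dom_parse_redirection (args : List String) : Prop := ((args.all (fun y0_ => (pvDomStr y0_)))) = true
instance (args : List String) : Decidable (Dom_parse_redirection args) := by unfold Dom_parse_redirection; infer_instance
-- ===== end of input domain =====

-- B replaces A's imperative index loop and if/elif operator chain by a table-driven
-- two-phase pipeline: a table-driven (OPS dict) scan
-- splitting args into plain arguments and redirection events, then a fold of the events
-- (later events overwrite earlier ones); objective: alternative (same linear cost).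

-- ===== PORT A =====
-- while loop over index i with mutable state, ported as recursion on the remaining suffix
def parseGoA (rest : List String) (so sm se em : Option String) (acc : List String) :
    List String × Option String × Option String × Option String × Option String :=
  match rest with
  | [] => (acc, so, sm, se, em)
  | x :: rest' =>
    if x = ">" ∨ x = "1>" then
      match rest' with
      | y :: rest'' => parseGoA rest'' (some y) (some "w") se em acc
      | [] => parseGoA [] so sm se em acc
    else if x = ">>" ∨ x = "1>>" then
      match rest' with
      | y :: rest'' => parseGoA rest'' (some y) (some "a") se em acc
      | [] => parseGoA [] so sm se em acc
    else if x = "2>" then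
      match rest' with
      | y :: rest'' => parseGoA rest'' so sm (some y) (some "w") acc
      | [] => parseGoA [] so sm se em acc
    else if x = "2>>" then
      match rest' with
      | y :: rest'' => parseGoA rest'' so sm (some y) (some "a") acc
      | [] => parseGoA [] so sm se em acc
    else
      parseGoA rest' so sm se em (acc ++ [x])
termination_by rest.length
decreasing_by all_goals simp only [List.length_cons] <;> omega

def parse_redirection (args : List String) :
    List String × Option String × Option String × Option String × Option String :=
  parseGoA args none none none none []

-- ===== PORT B =====
-- the OPS table: operator ↦ (target stream: 0 = stdout, 1 = stderr; mode)
def OPS : PySem.Dict String (Int × String) :=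
  PySem.Dict.mk [(">", (0, "w")), ("1>", (0, "w")), (">>", (0, "a")), ("1>>", (0, "a")),
   ("2>", (1, "w")), ("2>>", (1, "a"))]

-- phase 1: the index scan of Source B, consuming one or two tokens per step
def scanRed (args : List String) : List String × List (Int × String × String) :=
  match args with
  | [] => ([], [])
  | x :: rest =>
    match PySem.Dict.get? OPS x with
    | none =>
      match scanRed rest with
      | (na, ev) => (x :: na, ev)
    | some (tgt, mode) =>
      match rest with
      | [] => ([], [])   -- trailing operator with no filename: dropped
      | y :: rest' =>
        match scanRed rest' with
        | (na, ev) => (na, (tgt, y, mode) :: ev)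

-- phase 2: one event updates the (stdout_file, stdout_mode, stderr_file, stderr_mode) state
def applyEv (st : Option String × Option String × Option String × Option String)
    (e : Int × String × String) : Option String × Option String × Option String × Option String :=
  match st, e with
  | (so, sm, se, em), (tgt, f, m) =>
    if tgt = 0 then (some f, some m, se, em) else (so, sm, some f, some m)

def parse_redirection_alt (args : List String) :
    List String × Option String × Option String × Option String × Option String :=
  match scanRed args with
  | (na, events) => (na, events.foldl applyEv (none, none, none, none))

-- ===== PRECONDITION & SPEC =====
def Spec_parse_redirection (args : List String) (out : List String × Option String × Option String × Option String × Option String) : Prop := out = parse_redirection_alt args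
instance (args : List String) (out : List String × Option String × Option String × Option String × Option String) : Decidable (Spec_parse_redirection args out) := by unfold Spec_parse_redirection; infer_instance

-- ===== CLAIM (what is proved, stated in full; the proofs are below) =====
def Claim_equal_parse_redirection : Prop := ∀ (args : List String), Dom_parse_redirection args → Spec_parse_redirection args (parse_redirection args)

-- ===== LEMMAS AND PROOFS =====

-- A's loop equals B's scan followed by B's event fold started from the loop's incoming state
theorem key (rest : List String) (so sm se em : Option String) (acc : List String) :
    parseGoA rest so sm se em acc =
      (acc ++ (scanRed rest).1, (scanRed rest).2.foldl applyEv (so, sm, se, em)) := by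
  induction rest, so, sm, se, em, acc using parseGoA.induct with
  | case1 so sm se em acc => simp [parseGoA, scanRed]
  | case2 so sm se em acc x h1 y rest'' ih =>
      have hgo : parseGoA (x :: y :: rest'') so sm se em acc =
          parseGoA rest'' (some y) (some "w") se em acc := by
        rcases h1 with h | h <;> subst h <;> simp [parseGoA]
      have hop : PySem.Dict.get? OPS x = some (0, "w") := by
        rcases h1 with h | h <;> subst h <;> decide
      rw [hgo, ih]
      rcases hr : scanRed rest'' with ⟨na, ev⟩
      simp [scanRed, hop, hr, applyEv]
  | case3 so sm se em acc x h1 ih =>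
      rcases h1 with h | h <;> subst h <;>
        simp [parseGoA, scanRed, OPS, PySem.Dict.get?]
  | case4 so sm se em acc x h1 h2 y rest'' ih =>
      have hgo : parseGoA (x :: y :: rest'') so sm se em acc =
          parseGoA rest'' (some y) (some "a") se em acc := by
        rcases h2 with h | h <;> subst h <;> simp [parseGoA]
      have hop : PySem.Dict.get? OPS x = some (0, "a") := by
        rcases h2 with h | h <;> subst h <;> decide
      rw [hgo, ih]
      rcases hr : scanRed rest'' with ⟨na, ev⟩
      simp [scanRed, hop, hr, applyEv]
  | case5 so sm se em acc x h1 h2 ih =>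
      rcases h2 with h | h <;> subst h <;>
        simp [parseGoA, scanRed, OPS, PySem.Dict.get?]
  | case6 so sm se em acc y rest'' h1 h2 ih =>
      have hgo : parseGoA ("2>" :: y :: rest'') so sm se em acc =
          parseGoA rest'' so sm (some y) (some "w") acc := by simp [parseGoA]
      rw [hgo, ih]
      rcases hr : scanRed rest'' with ⟨na, ev⟩
      simp [scanRed, show PySem.Dict.get? OPS "2>" = some (1, "w") from by decide, hr, applyEv]
  | case7 so sm se em acc h1 h2 ih =>
      simp [parseGoA, scanRed, OPS, PySem.Dict.get?]
  | case8 so sm se em acc y rest'' h1 h2 h3 ih =>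
      have hgo : parseGoA ("2>>" :: y :: rest'') so sm se em acc =
          parseGoA rest'' so sm (some y) (some "a") acc := by simp [parseGoA]
      rw [hgo, ih]
      rcases hr : scanRed rest'' with ⟨na, ev⟩
      simp [scanRed, show PySem.Dict.get? OPS "2>>" = some (1, "a") from by decide, hr, applyEv]
  | case9 so sm se em acc h1 h2 h3 ih =>
      simp [parseGoA, scanRed, OPS, PySem.Dict.get?]
  | case10 so sm se em acc x rest' h1 h2 h3 h4 ih =>
      rw [not_or] at h1 h2
      have hgo : parseGoA (x :: rest') so sm se em acc =
          parseGoA rest' so sm se em (acc ++ [x]) := by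
        conv_lhs => rw [parseGoA.eq_def]
        simp [h1.1, h1.2, h2.1, h2.2, h3, h4]
      have hop : PySem.Dict.get? OPS x = none := by
        simp [OPS, PySem.Dict.get?, Ne.symm h1.1, Ne.symm h1.2, Ne.symm h2.1, Ne.symm h2.2,
          Ne.symm h3, Ne.symm h4]
      rw [hgo, ih]
      rcases hr : scanRed rest' with ⟨na, ev⟩
      simp [scanRed, hop, hr]

-- ===== VERDICT (by name: the statement is the Claim_ definition above) =====
theorem parse_redirection_spec : Claim_equal_parse_redirection := by
  intro args _
  unfold Spec_parse_redirection parse_redirection parse_redirection_alt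
  rw [key]
  rcases hr : scanRed args with ⟨na, ev⟩
  simp
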